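-- pv_equiv track=rewrite | github.com/nikeethr/rflexstudygroup | nikeethr/hacker_rank/flip_matrix.py | find_max_first_quadrant_sum
-- ===== SOURCE A (Python) =====
-- def find_max_first_quadrant_sum(A):
--     """
--         Given a 2N by 2N matrix A where first quadrant = A(i,j) i,j in [1,N]
--
--         Suppose:
--         1. Any (i,j) can only translate to the following other positions (2N-i,j), (i,2N-j),
--            (2N-i,2N-j). To see this consider the following:
--
--            Flipping is an involutory function, i.e. f(f(x)) = x. We have two flip functions f() for
--            rows and g() for columns. So the possible translations are g(x), f(x) and g(f(x)) =
--            f(g(x)).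
--
--         2. Any (i,j) in the first quadrant can be moved independently without affecting any other
--            element in the first quadrant. To see this consider the following:
--
--            If we want to move (i,2N-j) to (i,j) we will have to flip row i but this will change the
--            entire row. However, if we flip every other column (in the first quadrant) except column
--            j then these columns would not be affected by flipping row i. Furthermore, only (i,j) in
--            column j will be affected by flipping row i.
--
--            Now, we flip row i and flip back every other column except j we would have returned every
--            column back to its original state in the first quadrant. The only element that was
--            changed would be (i,j)
--
--            We can apply a similar reasoning for (2N-i,j) -> (i,j)
--
--            For (2N-i,2N-j) -> (i,j) we can first flip it to (2N-i,j) or (i,2N-j) without affecting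
--            the first quadrant and repeat the above reasoning.
--
--         Then:
--         Using 1. we know that the potential max value of each (i,j) in the first quadrant is given
--         by max(A(i,j), A(2N-i,j), A(i,2N-j), A(2N-i,2N-j)).
--
--         Using 2. we know that any of the elements (2N-i,j), (i,2N-j), (2N-i,2N-j) can be moved to
--         (i,j) independent of of any other element in the first quadrant.
--
--         Thus, the max sum of the first quadrant is simply
--         sum(max(A(i,j), A(2N-i), A(i,2N-j), A(2N-i, 2N-j))) for all i,j in [1,N]
--     """
--
--     if len(A) == 0 or len(A) % 2 != 0 or len(A) != len(A[0]):
--         raise("Invalid matrix, must be 2N x 2N")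
--
--     N = len(A) // 2
--     tot = 0
--
--     for i in range(N):
--         for j in range(N):
--             tot += max((A[i][j], A[i][2*N-j-1], A[2*N-i-1][j], A[2*N-i-1][2*N-j-1]))
--
--     return tot
-- ===== SOURCE B (Python) =====
-- def find_max_first_quadrant_sum(A):
--     if len(A) == 0 or len(A) % 2 != 0 or len(A) != len(A[0]):
--         raise("Invalid matrix, must be 2N x 2N")
--
--     n = len(A)
--     N = n // 2
--
--     # stage 1: fold each mirrored row pair (i, n-1-i) into one row of elementwise maxima
--     M = [[max(top, bot) for top, bot in zip(A[i], A[n - 1 - i])] for i in range(N)]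
--
--     # stage 2: fold each folded row's mirrored column pair (j, n-1-j) and sum everything
--     return sum(max(row[j], row[n - 1 - j]) for row in M for j in range(N))
-- ===== Notes on version B (the rewrite author's own statement) =====
-- stated objective: alternative
-- what changed: Replaces A's per-cell gather of the four mirrored entries inside a nested index loop by a two-stage reduction: first fold each mirrored row pair into one row of elementwise maxima (via zip), then fold mirrored column pairs of those rows and sum.
import Mathlib
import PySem

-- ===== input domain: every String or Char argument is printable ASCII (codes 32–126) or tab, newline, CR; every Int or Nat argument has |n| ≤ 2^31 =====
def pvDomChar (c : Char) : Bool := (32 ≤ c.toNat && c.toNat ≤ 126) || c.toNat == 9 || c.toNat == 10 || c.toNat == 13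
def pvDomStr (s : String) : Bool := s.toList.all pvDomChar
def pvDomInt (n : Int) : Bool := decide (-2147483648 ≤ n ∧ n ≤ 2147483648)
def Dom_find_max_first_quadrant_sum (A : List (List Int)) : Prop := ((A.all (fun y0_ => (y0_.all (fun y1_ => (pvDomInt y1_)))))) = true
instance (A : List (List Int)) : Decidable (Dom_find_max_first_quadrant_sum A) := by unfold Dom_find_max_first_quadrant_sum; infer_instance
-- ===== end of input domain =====

-- B replaces A's per-cell gather of four mirrored entries by a two-stage reduction
-- (elementwise max of mirrored row pairs, then max of mirrored column pairs, then sum);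
-- objective: alternative decomposition, same O(N^2) cost.

-- ===== PORT A =====
def find_max_first_quadrant_sum (A : List (List Int)) : Int :=
  -- validation branch raises (TypeError) in Python; those inputs are excluded by Pre_
  let N : Int := PySem.Int.floordiv (A.length : Int) 2
  (PySem.List.pyRange 0 N 1).foldl (fun tot i =>
    (PySem.List.pyRange 0 N 1).foldl (fun tot j =>
      tot + (PySem.List.max?
        [PySem.List.pyGetD (PySem.List.pyGetD A i []) j 0,
         PySem.List.pyGetD (PySem.List.pyGetD A i []) (2*N - j - 1) 0,
         PySem.List.pyGetD (PySem.List.pyGetD A (2*N - i - 1) []) j 0,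
         PySem.List.pyGetD (PySem.List.pyGetD A (2*N - i - 1) []) (2*N - j - 1) 0]
        (fun y => y)).getD 0) tot) 0

-- ===== PORT B =====
def find_max_first_quadrant_sum_alt (A : List (List Int)) : Int :=
  let n : Int := (A.length : Int)
  let N : Int := PySem.Int.floordiv n 2
  let M : List (List Int) := (PySem.List.pyRange 0 N 1).map (fun i =>
    ((PySem.List.pyGetD A i []).zip (PySem.List.pyGetD A (n - 1 - i) [])).map
      (fun p => max p.1 p.2))
  (M.map (fun row =>
    ((PySem.List.pyRange 0 N 1).map (fun j =>
      max (PySem.List.pyGetD row j 0) (PySem.List.pyGetD row (n - 1 - j) 0))).sum)).sum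

-- ===== PRECONDITION & SPEC =====
-- Pre_ excludes exactly the inputs where the Python A raises: the explicit validation
-- (empty, odd size, or len(A[0]) ≠ len(A)) raises TypeError, and a later row shorter
-- than len(A) raises IndexError.
def Pre_find_max_first_quadrant_sum (A : List (List Int)) : Prop :=
  A ≠ [] ∧ A.length % 2 = 0 ∧ (A.headD []).length = A.length ∧
    ∀ row ∈ A, A.length ≤ row.length
instance (A : List (List Int)) : Decidable (Pre_find_max_first_quadrant_sum A) := by
  unfold Pre_find_max_first_quadrant_sum; infer_instance
def pvWitness_find_max_first_quadrant_sum : List (List Int) := [[1, 2], [3, 4]]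

def Spec_find_max_first_quadrant_sum (A : List (List Int)) (out : Int) : Prop := out = find_max_first_quadrant_sum_alt A
instance (A : List (List Int)) (out : Int) : Decidable (Spec_find_max_first_quadrant_sum A out) := by unfold Spec_find_max_first_quadrant_sum; infer_instance

-- ===== CLAIM (what is proved, stated in full; the proofs are below) =====
def Claim_equal_find_max_first_quadrant_sum : Prop := ∀ (A : List (List Int)), Dom_find_max_first_quadrant_sum A → Pre_find_max_first_quadrant_sum A → Spec_find_max_first_quadrant_sum A (find_max_first_quadrant_sum A)

-- ===== LEMMAS AND PROOFS =====

-- A's left-nested running max over the 4-tuple equals B's pairing of row-max then column-max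
lemma max4_rearrange (a b c d : Int) :
    max (max (max a b) c) d = max (max a c) (max b d) := by
  simp only [max_def]; split_ifs <;> omega

-- indexing into the elementwise-max of a zipped pair of rows
lemma zipmax_getD (xs ys : List Int) (k : Nat) (hk : k < xs.length) (hk' : k < ys.length) :
    ((xs.zip ys).map (fun p => max p.1 p.2)).getD k 0 = max (xs.getD k 0) (ys.getD k 0) := by
  rw [List.getD_eq_getElem _ _ (by simp [List.length_zip]; omega),
      List.getD_eq_getElem _ _ hk, List.getD_eq_getElem _ _ hk']
  simp [List.getElem_zip]

-- per-cell equality: A's 4-way gather equals B's folded-row pairing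
lemma cell_eq (A : List (List Int)) (i j : Nat)
    (hiA : i < A.length) (hi'A : A.length - 1 - i < A.length)
    (hjr : ∀ x, x < A.length → A.length ≤ (A.getD x []).length) (hjn : j < A.length)
    (hj'n : A.length - 1 - j < A.length) :
    (PySem.List.max?
        [(A.getD i []).getD j 0,
         (A.getD i []).getD (A.length - 1 - j) 0,
         (A.getD (A.length - 1 - i) []).getD j 0,
         (A.getD (A.length - 1 - i) []).getD (A.length - 1 - j) 0]
        (fun y => y)).getD 0 =
      max ((((A.getD i []).zip (A.getD (A.length - 1 - i) [])).map
              (fun p => max p.1 p.2)).getD j 0)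
          ((((A.getD i []).zip (A.getD (A.length - 1 - i) [])).map
              (fun p => max p.1 p.2)).getD (A.length - 1 - j) 0) := by
  have h1 := hjr i hiA
  have h2 := hjr (A.length - 1 - i) hi'A
  rw [PySem.List.max?_id_cons]
  simp only [List.foldl, Option.getD_some]
  rw [zipmax_getD _ _ _ (by omega) (by omega), zipmax_getD _ _ _ (by omega) (by omega)]
  exact max4_rearrange _ _ _ _

theorem find_max_first_quadrant_sum_spec : Claim_equal_find_max_first_quadrant_sum := by
  intro A _hDom hPre
  obtain ⟨hne, heven, _h0, hrows⟩ := hPre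
  unfold Spec_find_max_first_quadrant_sum
  unfold find_max_first_quadrant_sum find_max_first_quadrant_sum_alt
  have hn0 : A.length ≠ 0 := fun h => hne (List.length_eq_zero_iff.mp h)
  have hfd : PySem.Int.floordiv (A.length : Int) 2 = ((A.length / 2 : Nat) : Int) := by
    exact_mod_cast PySem.Int.floordiv_natCast A.length 2
  have hjr : ∀ x, x < A.length → A.length ≤ (A.getD x []).length := by
    intro x hx
    rw [List.getD_eq_getElem _ _ hx]
    exact hrows _ (List.getElem_mem hx)
  simp only [hfd, PySem.List.pyRange_zero_natCast, List.foldl_map, List.map_map,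
    Function.comp_def, PySem.List.foldl_add, zero_add]
  refine congrArg List.sum (List.map_congr_left ?_)
  intro i hi
  rw [List.mem_range] at hi
  refine congrArg List.sum (List.map_congr_left ?_)
  intro j hj
  rw [List.mem_range] at hj
  have c1 : (2 * ((A.length / 2 : Nat) : Int) - (j : Int) - 1) = ((A.length - 1 - j : Nat) : Int) := by
    omega
  have c2 : (2 * ((A.length / 2 : Nat) : Int) - (i : Int) - 1) = ((A.length - 1 - i : Nat) : Int) := by
    omega
  have c3 : ((A.length : Int) - 1 - (i : Int)) = ((A.length - 1 - i : Nat) : Int) := by omega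
  have c4 : ((A.length : Int) - 1 - (j : Int)) = ((A.length - 1 - j : Nat) : Int) := by omega
  rw [c1, c2, c3, c4]
  simp only [PySem.List.pyGetD_natCast]
  exact cell_eq A i j (by omega) (by omega) hjr (by omega) (by omega)
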